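-- pv_equiv track=rewrite | github.com/psu6810110496/Kivy-Game-Project | APOCALITE/game/wave_manager.py | _wave_stat_bonus
-- ===== SOURCE A (Python) =====
-- def _wave_stat_bonus(wave: int) -> int:
--     """คำนวณ cumulative bonus ตาม pattern +2,+2,+3,+4,+5,+7,+9,+11,+13,+15,+17,...
--     หลัง index 10 จะเพิ่ม +2 ต่อ step ไปเรื่อยๆ (19, 21, 23, ...)"""
--     if wave <= 0:
--         return 0
--     increments = [2, 2, 3, 4, 5, 7, 9, 11, 13, 15, 17]
--     total = 0
--     for i in range(wave):
--         if i < len(increments):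
--             total += increments[i]
--         else:
--             total += increments[-1] + (i - (len(increments) - 1)) * 2
--     return total
-- ===== SOURCE B (Python) =====
-- _PREFIX = [0, 2, 4, 7, 11, 16, 23, 32, 43, 56, 71, 88]
--
-- def _wave_stat_bonus(wave: int) -> int:
--     if wave <= 0:
--         return 0
--     if wave <= 11:
--         return _PREFIX[wave]
--     m = wave - 11
--     return 88 + m * (m + 18)
-- ===== Notes on version B (the rewrite author's own statement) =====
-- stated objective: faster
-- what changed: Replaced the O(wave) accumulation loop with an O(1) closed form: a small prefix-sum table for the first eleven waves plus an arithmetic-series (quadratic) formula for larger waves.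
import Mathlib
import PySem

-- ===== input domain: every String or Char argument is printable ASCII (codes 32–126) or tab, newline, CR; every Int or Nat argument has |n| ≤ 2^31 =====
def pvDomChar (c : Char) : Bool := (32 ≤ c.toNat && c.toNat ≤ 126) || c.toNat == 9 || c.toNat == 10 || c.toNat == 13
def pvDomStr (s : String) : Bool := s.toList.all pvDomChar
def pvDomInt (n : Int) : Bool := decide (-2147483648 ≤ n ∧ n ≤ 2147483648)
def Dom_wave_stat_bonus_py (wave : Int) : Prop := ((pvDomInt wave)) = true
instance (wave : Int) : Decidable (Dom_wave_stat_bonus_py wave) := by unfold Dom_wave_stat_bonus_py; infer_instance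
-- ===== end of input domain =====

-- B replaces A's O(wave) accumulation loop by an O(1) prefix-sum table + arithmetic-series closed form (objective: faster).

-- ===== PORT A =====
-- literal transliteration of A's loop: range(wave) fold; increments[i] / increments[-1]
-- use PySem.List.pyGetD (exact here: the guarded index is always in range, and -1 wraps to the last element).
def pvIncrements : List Int := [2, 2, 3, 4, 5, 7, 9, 11, 13, 15, 17]

def wave_stat_bonus_py (wave : Int) : Int :=
  if wave ≤ 0 then 0
  else
    (PySem.List.pyRange 0 wave 1).foldl
      (fun total i =>
        if i < (pvIncrements.length : Int) then
          total + PySem.List.pyGetD pvIncrements i 0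
        else
          total + (PySem.List.pyGetD pvIncrements (-1) 0 + (i - ((pvIncrements.length : Int) - 1)) * 2))
      0

-- ===== PORT B =====
def pvPrefix : List Int := [0, 2, 4, 7, 11, 16, 23, 32, 43, 56, 71, 88]

def wave_stat_bonus_py_alt (wave : Int) : Int :=
  if wave ≤ 0 then 0
  else if wave ≤ 11 then PySem.List.pyGetD pvPrefix wave 0
  else
    let m := wave - 11
    88 + m * (m + 18)

-- ===== PRECONDITION & SPEC =====
def Spec_wave_stat_bonus_py (wave : Int) (out : Int) : Prop := out = wave_stat_bonus_py_alt wave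
instance (wave : Int) (out : Int) : Decidable (Spec_wave_stat_bonus_py wave out) := by unfold Spec_wave_stat_bonus_py; infer_instance

-- ===== CLAIM (what is proved, stated in full; the proofs are below) =====
def Claim_equal_wave_stat_bonus_py : Prop := ∀ (wave : Int), Dom_wave_stat_bonus_py wave → Spec_wave_stat_bonus_py wave (wave_stat_bonus_py wave)

-- ===== LEMMAS AND PROOFS =====

-- the loop body of A
def pvStep (total i : Int) : Int :=
  if i < (pvIncrements.length : Int) then
    total + PySem.List.pyGetD pvIncrements i 0
  else
    total + (PySem.List.pyGetD pvIncrements (-1) 0 + (i - ((pvIncrements.length : Int) - 1)) * 2)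

lemma pvStep_large (i : Int) (hi : 11 ≤ i) (total : Int) :
    pvStep total i = total + (17 + (i - 10) * 2) := by
  unfold pvStep
  rw [if_neg (by simp [pvIncrements]; omega)]
  simp [pvIncrements, PySem.List.pyGetD, PySem.List.pyIdx?, PySem.List.pyGet?]

lemma pvLoop_eq_alt (n : ℕ) :
    (PySem.List.pyRange 0 (n : Int) 1).foldl pvStep 0 = wave_stat_bonus_py_alt (n : Int) := by
  induction n with
  | zero => simp [wave_stat_bonus_py_alt]
  | succ n ih =>
    have h : (((n : ℕ) + 1 : ℕ) : Int) = (n : Int) + 1 := by push_cast; ring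
    rw [h, PySem.List.pyRange_one_succ_right (by positivity), List.foldl_append, ih]
    by_cases hn : n ≤ 10
    · interval_cases n <;> decide
    · -- tail region: both sides by the closed form
      have hn' : (11 : Int) ≤ (n : Int) := by exact_mod_cast (by omega : 11 ≤ n)
      rw [List.foldl_cons, List.foldl_nil, pvStep_large _ hn']
      by_cases h11 : n = 11
      · subst h11; decide
      · unfold wave_stat_bonus_py_alt
        split_ifs <;> first
          | omega
          | (push_cast; ring)

-- ===== VERDICT (by name: the statement is the Claim_ definition above) =====
theorem wave_stat_bonus_py_spec : Claim_equal_wave_stat_bonus_py := by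
  intro wave _
  unfold Spec_wave_stat_bonus_py wave_stat_bonus_py
  by_cases h : wave ≤ 0
  · rw [if_pos h]
    unfold wave_stat_bonus_py_alt
    rw [if_pos h]
  · rw [if_neg h]
    have hw : wave = ((wave.toNat : ℕ) : Int) := by omega
    rw [hw]
    exact pvLoop_eq_alt wave.toNat
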